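-- pv_equiv track=rewrite | github.com/ahrtz/study | 혼자하는거/4880_토너먼트카드게임.py | tour
-- ===== SOURCE A (Python) =====
-- def tour(a):
--     tmp=[]
--     if len(a) % 2 ==0:
--         for i in range(0,len(a),2):
--             if a[i][-1]==a[i+1][-1] :
--                 tmp.append(a[i])
--             elif a[i][-1]==1 and a[i+1][-1]==2:
--                 tmp.append(a[i+1])
--             elif a[i][-1]==1 and a[i+1][-1]==3:
--                 tmp.append(a[i])
--             elif a[i][-1]==2 and a[i+1][-1]==1:
--                 tmp.append(a[i])
--             elif a[i][-1]==2 and a[i+1][-1]==3: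
--                 tmp.append(a[i+1])
--             elif a[i][-1]==3 and a[i+1][-1]==1:
--                 tmp.append(a[i+1])
--             elif a[i][-1]==3 and a[i+1][-1]==2:
--                 tmp.append(a[i])
--     else:
--         for i in range(0,len(a)-1,2):
--             if a[i][-1]==a[i+1][-1] :
--                 tmp.append(a[i])
--             elif a[i][-1]==1 and a[i+1][-1]==2:
--                 tmp.append(a[i+1])
--             elif a[i][-1]==1 and a[i+1][-1]==3:
--                 tmp.append(a[i])
--             elif a[i][-1]==2 and a[i+1][-1]==1:
--                 tmp.append(a[i])
--             elif a[i][-1]==2 and a[i+1][-1]==3: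
--                 tmp.append(a[i+1])
--             elif a[i][-1]==3 and a[i+1][-1]==1:
--                 tmp.append(a[i+1])
--             elif a[i][-1]==3 and a[i+1][-1]==2:
--                 tmp.append(a[i])
--     if len(tmp)==1:
--         return tmp
--     else:
--         return tour(tmp)
-- ===== SOURCE B (Python) =====
-- def tour(a):
--     # Iterative tournament: one uniform pair scan per round (range(0, len-1, 2)
--     # covers even and odd round sizes alike; a dangling last player is dropped),
--     # tie -> first player advances, otherwise the arithmetic RPS rule decides;
--     # a pair of unequal non-moves is rejected as invalid input.
--     while len(a) != 1:
--         nxt = []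
--         for i in range(0, len(a) - 1, 2):
--             x, y = a[i], a[i + 1]
--             if x[-1] == y[-1]:
--                 nxt.append(x)
--             elif x[-1] in (1, 2, 3) and y[-1] in (1, 2, 3):
--                 nxt.append(y if (y[-1] - x[-1]) % 3 == 1 else x)
--             else:
--                 raise ValueError("invalid move")
--         a = nxt
--     return a
-- ===== Notes on version B (the rewrite author's own statement) =====
-- stated objective: simpler
-- what changed: Replaces the recursion with duplicated 7-branch if/elif chains for even/odd rounds by a while-loop with one uniform pair scan (range(0, len-1, 2) covers both parities) and a compact winner rule: tie keeps the first player, otherwise (y-x) % 3 == 1 means y wins; a pair of unequal non-moves raises ValueError instead of A's silent elimination of both players.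
-- outside the precondition, e.g. on tour([[4], [5], [1], [2]]): A returns [[2]], B raises ValueError; on tour([[1]]): A raises RecursionError, B returns [[1]]
import Mathlib
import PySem

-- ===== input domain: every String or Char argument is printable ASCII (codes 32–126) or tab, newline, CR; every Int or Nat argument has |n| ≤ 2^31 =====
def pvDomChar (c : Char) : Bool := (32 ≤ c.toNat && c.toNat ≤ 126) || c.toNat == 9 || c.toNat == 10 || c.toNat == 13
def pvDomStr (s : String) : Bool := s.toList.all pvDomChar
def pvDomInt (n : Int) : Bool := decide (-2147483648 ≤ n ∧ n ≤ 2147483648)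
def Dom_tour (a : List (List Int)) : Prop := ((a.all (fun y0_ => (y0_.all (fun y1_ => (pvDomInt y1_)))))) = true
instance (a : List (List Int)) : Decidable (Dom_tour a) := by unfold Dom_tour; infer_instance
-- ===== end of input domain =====

-- B replaces A's recursion with duplicated even/odd if/elif chains by an iterative
-- while-loop with a single uniform pair scan and an arithmetic winner rule.

-- ===== PORT A =====
-- a[i][-1] ported as pyGetD … (-1) 0; the default is never read on Pre_ inputs
-- (inner lists are nonempty there), and Pre_ excludes the inputs where Python raises.
def bodyA (a : List (List Int)) (tmp : List (List Int)) (i : Int) : List (List Int) :=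
  let x := PySem.List.pyGetD a i []
  let y := PySem.List.pyGetD a (i + 1) []
  let xl := PySem.List.pyGetD x (-1) 0
  let yl := PySem.List.pyGetD y (-1) 0
  if xl = yl then tmp ++ [x]
  else if xl = 1 ∧ yl = 2 then tmp ++ [y]
  else if xl = 1 ∧ yl = 3 then tmp ++ [x]
  else if xl = 2 ∧ yl = 1 then tmp ++ [x]
  else if xl = 2 ∧ yl = 3 then tmp ++ [y]
  else if xl = 3 ∧ yl = 1 then tmp ++ [y]
  else if xl = 3 ∧ yl = 2 then tmp ++ [x]
  else tmp

-- fuel = recursion-depth guard only (Python A recurses unboundedly on inputs outside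
-- Pre_); on Pre_ inputs the fuel is never exhausted (round sizes strictly decrease).
def tourGo : Nat → List (List Int) → List (List Int)
  | 0, a => a
  | fuel + 1, a =>
    let tmp :=
      if PySem.Int.mod (a.length : Int) 2 = 0 then
        (PySem.List.pyRange 0 (a.length : Int) 2).foldl (bodyA a) []
      else
        (PySem.List.pyRange 0 ((a.length : Int) - 1) 2).foldl (bodyA a) []
    if tmp.length = 1 then tmp else tourGo fuel tmp

def tour (a : List (List Int)) : List (List Int) := tourGo (a.length + 1) a

-- ===== PORT B =====
-- one iteration of B's inner for-loop; Option is the exception monad: none = the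
-- ValueError B raises on a pair of unequal non-moves (excluded by Pre_)
def stepB (a : List (List Int)) (acc : Option (List (List Int))) (i : Int) : Option (List (List Int)) :=
  match acc with
  | none => none
  | some nxt =>
    let x := PySem.List.pyGetD a i []
    let y := PySem.List.pyGetD a (i + 1) []
    let xl := PySem.List.pyGetD x (-1) 0
    let yl := PySem.List.pyGetD y (-1) 0
    if xl = yl then some (nxt ++ [x])
    else if (xl = 1 ∨ xl = 2 ∨ xl = 3) ∧ (yl = 1 ∨ yl = 2 ∨ yl = 3) then
      some (nxt ++ [if PySem.Int.mod (yl - xl) 3 = 1 then y else x])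
    else none

-- fuel = loop guard only (Python B's while-loop spins forever on the empty list,
-- outside Pre_); never exhausted on Pre_ inputs.
def tourAltGo : Nat → List (List Int) → Option (List (List Int))
  | 0, a => some a
  | fuel + 1, a =>
    if a.length = 1 then some a
    else
      match (PySem.List.pyRange 0 ((a.length : Int) - 1) 2).foldl (stepB a) (some []) with
      | none => none
      | some nxt => tourAltGo fuel nxt

-- none = Python B raises (ValueError / IndexError); such inputs are outside Pre_,
-- and the .getD [] default is never reached there
def tour_alt (a : List (List Int)) : List (List Int) := (tourAltGo (a.length + 1) a).getD []

-- ===== PRECONDITION & SPEC =====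
-- Pre_ restricts to the natural tournament domain: at least two players whose paired
-- entries (a dangling odd-position last player is never inspected) each end in a move
-- 1/2/3, or all end in one common value (every pair ties). Outside it A either raises
-- (RecursionError on fewer than two players or when every pair is dropped, IndexError
-- on an empty card list) or silently drops BOTH players of a pair whose unequal last
-- entries are not both moves — an accident of the if/elif chain no caller relies on.
def Pre_tour (a : List (List Int)) : Prop :=
  2 ≤ a.length ∧
    ((∀ x ∈ a.take (2 * (a.length / 2)),
        (x.getLast? = some 1 ∨ x.getLast? = some 2 ∨ x.getLast? = some 3)) ∨
     (∀ x ∈ a.take (2 * (a.length / 2)),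
        x ≠ [] ∧ x.getLast? = ((a.headI : List Int)).getLast?))
instance (a : List (List Int)) : Decidable (Pre_tour a) := by unfold Pre_tour; infer_instance
def pvWitness_tour : List (List Int) := [[1], [2]]

def Spec_tour (a : List (List Int)) (out : List (List Int)) : Prop := out = tour_alt a
instance (a : List (List Int)) (out : List (List Int)) : Decidable (Spec_tour a out) := by unfold Spec_tour; infer_instance

-- ===== CLAIM (what is proved, stated in full; the proofs are below) =====
def Claim_equal_tour : Prop := ∀ (a : List (List Int)), Dom_tour a → Pre_tour a → Spec_tour a (tour a)

-- ===== LEMMAS AND PROOFS =====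

-- the winner of one pair, as B computes it
def winner (x y : List Int) : List Int :=
  if PySem.Int.mod (PySem.List.pyGetD y (-1) 0 - PySem.List.pyGetD x (-1) 0) 3 = 1 then y else x

-- the list A's if/elif chain appends for one pair (possibly empty outside Pre_)
def chainA (x y : List Int) : List (List Int) :=
  let xl := PySem.List.pyGetD x (-1) 0
  let yl := PySem.List.pyGetD y (-1) 0
  if xl = yl then [x]
  else if xl = 1 ∧ yl = 2 then [y]
  else if xl = 1 ∧ yl = 3 then [x]
  else if xl = 2 ∧ yl = 1 then [x]
  else if xl = 2 ∧ yl = 3 then [y]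
  else if xl = 3 ∧ yl = 1 then [y]
  else if xl = 3 ∧ yl = 2 then [x]
  else []

-- the round both programs compute, as a two-at-a-time structural recursion
def pairsW : List (List Int) → List (List Int)
  | x :: y :: r => winner x y :: pairsW r
  | _ => []

-- invariant carried through the rounds: every inspected entry ends in a move, or
-- all inspected entries end in one common value
def InvT (l : List (List Int)) : Prop :=
  (∀ x ∈ l, (x.getLast? = some 1 ∨ x.getLast? = some 2 ∨ x.getLast? = some 3)) ∨
  (∃ c, ∀ x ∈ l, x.getLast? = some c)

-- the paired prefix: the entries a round actually inspects
def core (a : List (List Int)) : List (List Int) := a.take (2 * (a.length / 2))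

lemma bodyA_eq (a : List (List Int)) (tmp : List (List Int)) (i : Int) :
    bodyA a tmp i = tmp ++ chainA (PySem.List.pyGetD a i []) (PySem.List.pyGetD a (i + 1) []) := by
  simp only [bodyA, chainA]
  split_ifs <;> simp

lemma pyGetD_neg_one_last (x : List Int) (v : Int) (h : x.getLast? = some v) :
    PySem.List.pyGetD x (-1) 0 = v := by
  rcases x.eq_nil_or_concat with rfl | ⟨ys, b, rfl⟩
  · simp at h
  · simp at h
    subst h
    simp [PySem.List.pyGetD, PySem.List.pyGet?, PySem.List.pyIdx?]

lemma chain_eq_winner (x y : List Int)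
    (hx : x.getLast? = some 1 ∨ x.getLast? = some 2 ∨ x.getLast? = some 3)
    (hy : y.getLast? = some 1 ∨ y.getLast? = some 2 ∨ y.getLast? = some 3) :
    chainA x y = [winner x y] := by
  rcases hx with hx | hx | hx <;> rcases hy with hy | hy | hy <;>
    simp [chainA, winner, pyGetD_neg_one_last x _ hx, pyGetD_neg_one_last y _ hy]

lemma chain_eq_winner_tie (x y : List Int) (c : Int)
    (hx : x.getLast? = some c) (hy : y.getLast? = some c) :
    chainA x y = [winner x y] := by
  simp [chainA, winner, pyGetD_neg_one_last x c hx, pyGetD_neg_one_last y c hy]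

lemma chain_eq_winner' (l : List (List Int)) (h : InvT l) (x y : List Int)
    (hx : x ∈ l) (hy : y ∈ l) : chainA x y = [winner x y] := by
  rcases h with h | ⟨c, h⟩
  · exact chain_eq_winner x y (h x hx) (h y hy)
  · exact chain_eq_winner_tie x y c (h x hx) (h y hy)

lemma InvT_subset (l l' : List (List Int)) (hs : l' ⊆ l) (h : InvT l) : InvT l' := by
  rcases h with h | ⟨c, h⟩
  · exact Or.inl (fun x hx => h x (hs hx))
  · exact Or.inr ⟨c, fun x hx => h x (hs hx)⟩

lemma core_cons_cons (x y : List Int) (r : List (List Int)) :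
    core (x :: y :: r) = x :: y :: core r := by
  unfold core
  have h2 : 2 * ((x :: y :: r).length / 2) = 2 * (r.length / 2) + 1 + 1 := by
    simp; omega
  rw [h2, List.take_succ_cons, List.take_succ_cons]

-- the step-2 index range both rounds scan, as a mapped Nat range
lemma pyRange_two (L : Nat) :
    PySem.List.pyRange 0 ((L : Int) - 1) 2 = (List.range (L / 2)).map (fun k => ((2 * k : Nat) : Int)) := by
  rw [PySem.List.pyRange_of_pos 0 ((L : Int) - 1) (by norm_num)]
  have he : (L : Int) - 1 - 0 + 2 - 1 = (L : Int) := by ring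
  rw [he]
  have hc : (if (0 : Int) < (L : Int) - 1 then ((L : Int) / 2).toNat else 0) = L / 2 := by
    split_ifs with h <;> omega
  rw [hc]
  apply List.map_congr_left
  intro k _
  push_cast
  ring

lemma pyRange_two_even (L : Nat) (h : PySem.Int.mod (L : Int) 2 = 0) :
    PySem.List.pyRange 0 (L : Int) 2 = PySem.List.pyRange 0 ((L : Int) - 1) 2 := by
  rw [PySem.Int.mod_eq_emod_of_pos (by norm_num)] at h
  rw [PySem.List.pyRange_of_pos 0 (L : Int) (by norm_num),
      PySem.List.pyRange_of_pos 0 ((L : Int) - 1) (by norm_num)]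
  have hc : (if (0:Int) < (L : Int) then (((L : Int) - 0 + 2 - 1) / 2).toNat else 0)
      = (if (0:Int) < (L : Int) - 1 then (((L : Int) - 1 - 0 + 2 - 1) / 2).toNat else 0) := by
    split_ifs <;> omega
  rw [hc]

-- a flatMap over the step-2 index range is the two-at-a-time recursion
def pairsFg (g : List Int → List Int → List (List Int)) : List (List Int) → List (List Int)
  | x :: y :: r => g x y ++ pairsFg g r
  | _ => []

lemma range_pairs (g : List Int → List Int → List (List Int)) :
    ∀ xs : List (List Int),
      (List.range (xs.length / 2)).flatMap
        (fun k => g (xs.getD (2 * k) []) (xs.getD (2 * k + 1) [])) = pairsFg g xs := by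
  intro xs
  induction xs using pairsFg.induct with
  | case1 x y r ih =>
    have hl : (x :: y :: r).length / 2 = r.length / 2 + 1 := by simp; omega
    rw [hl, List.range_succ_eq_map, List.flatMap_cons]
    simp only [pairsFg]
    congr 1
    rw [List.flatMap_map, ← ih]
    apply List.flatMap_congr
    intro k _
    have h1 : 2 * Nat.succ k = 2 * k + 1 + 1 := by omega
    simp [h1]
  | case2 t h =>
    rcases t with _ | ⟨a, _ | ⟨b, r⟩⟩
    · simp [pairsFg]
    · simp [pairsFg]
    · exact absurd rfl (fun hh => h a b r hh)

lemma pairsFg_winner (a : List (List Int)) :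
    pairsFg (fun x y => [winner x y]) a = pairsW a := by
  induction a using pairsW.induct with
  | case1 x y r ih => simp [pairsFg, pairsW, ih]
  | case2 t h =>
    rcases t with _ | ⟨z, _ | ⟨w, r⟩⟩
    · simp [pairsFg, pairsW]
    · simp [pairsFg, pairsW]
    · exact absurd rfl (fun hh => h z w r hh)

lemma pairsFg_chain (a : List (List Int)) (h : InvT (core a)) :
    pairsFg chainA a = pairsW a := by
  induction a using pairsW.induct with
  | case1 x y r ih =>
    rw [core_cons_cons] at h
    have hr : InvT (core r) :=
      InvT_subset _ _ (fun z hz => List.mem_cons_of_mem _ (List.mem_cons_of_mem _ hz)) h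
    simp [pairsFg, pairsW,
      chain_eq_winner' _ h x y (by simp) (by simp), ih hr]
  | case2 t ht =>
    rcases t with _ | ⟨z, _ | ⟨w, r⟩⟩
    · simp [pairsFg, pairsW]
    · simp [pairsFg, pairsW]
    · exact absurd rfl (fun hh => ht z w r hh)

lemma round_getD (g : List Int → List Int → List (List Int)) (a : List (List Int)) :
    (PySem.List.pyRange 0 ((a.length : Int) - 1) 2).flatMap
        (fun i => g (PySem.List.pyGetD a i []) (PySem.List.pyGetD a (i + 1) []))
      = pairsFg g a := by
  rw [pyRange_two, List.flatMap_map, ← range_pairs g a]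
  apply List.flatMap_congr
  intro k _
  show g (PySem.List.pyGetD a ((2 * k : Nat) : Int) [])
        (PySem.List.pyGetD a (((2 * k : Nat) : Int) + 1) []) = _
  have h1 : ((2 * k : Nat) : Int) + 1 = ((2 * k + 1 : Nat) : Int) := by push_cast; ring
  rw [h1, PySem.List.pyGetD_natCast, PySem.List.pyGetD_natCast]

lemma roundA_eq (a : List (List Int)) (h : InvT (core a)) :
    (PySem.List.pyRange 0 ((a.length : Int) - 1) 2).foldl (bodyA a) [] = pairsW a := by
  have hb : bodyA a = fun tmp i =>
      tmp ++ chainA (PySem.List.pyGetD a i []) (PySem.List.pyGetD a (i + 1) []) := by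
    funext tmp i; exact bodyA_eq a tmp i
  rw [hb, PySem.List.foldl_append_eq_flatMap, List.nil_append, round_getD chainA a,
      pairsFg_chain a h]

-- "the pair is decidable": equal last entries, or both last entries are moves
def GoodPair (x y : List Int) : Prop :=
  PySem.List.pyGetD x (-1) 0 = PySem.List.pyGetD y (-1) 0 ∨
  ((PySem.List.pyGetD x (-1) 0 = 1 ∨ PySem.List.pyGetD x (-1) 0 = 2 ∨ PySem.List.pyGetD x (-1) 0 = 3) ∧
   (PySem.List.pyGetD y (-1) 0 = 1 ∨ PySem.List.pyGetD y (-1) 0 = 2 ∨ PySem.List.pyGetD y (-1) 0 = 3))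

lemma good_of_mem (l : List (List Int)) (h : InvT l) (x y : List Int)
    (hx : x ∈ l) (hy : y ∈ l) : GoodPair x y := by
  rcases h with h | ⟨c, h⟩
  · refine Or.inr ⟨?_, ?_⟩
    · rcases h x hx with hh | hh | hh <;>
        simp [pyGetD_neg_one_last x _ hh]
    · rcases h y hy with hh | hh | hh <;>
        simp [pyGetD_neg_one_last y _ hh]
  · exact Or.inl (by rw [pyGetD_neg_one_last x c (h x hx), pyGetD_neg_one_last y c (h y hy)])

lemma winner_tie (x y : List Int)
    (h : PySem.List.pyGetD x (-1) 0 = PySem.List.pyGetD y (-1) 0) : winner x y = x := by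
  unfold winner
  rw [if_neg]
  rw [h, sub_self]
  decide

lemma stepB_good (a : List (List Int)) (nxt : List (List Int)) (i : Int)
    (hg : GoodPair (PySem.List.pyGetD a i []) (PySem.List.pyGetD a (i + 1) [])) :
    stepB a (some nxt) i
      = some (nxt ++ [winner (PySem.List.pyGetD a i []) (PySem.List.pyGetD a (i + 1) [])]) := by
  simp only [stepB]
  by_cases he : PySem.List.pyGetD (PySem.List.pyGetD a i []) (-1) 0
      = PySem.List.pyGetD (PySem.List.pyGetD a (i + 1) []) (-1) 0
  · rw [if_pos he, winner_tie _ _ he]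
  · rcases hg with hg | hg
    · exact absurd hg he
    · rw [if_neg he, if_pos hg]
      rfl

lemma getD_mem_core (a : List (List Int)) (k : Nat) (hk : k < 2 * (a.length / 2)) :
    a.getD k [] ∈ core a := by
  have hk' : k < a.length := by omega
  have hlen : k < (a.take (2 * (a.length / 2))).length := by
    simp [List.length_take]; omega
  have he : (a.take (2 * (a.length / 2)))[k]'hlen = a[k]'hk' := List.getElem_take
  rw [List.getD_eq_getElem a [] hk', core, ← he]
  exact List.getElem_mem hlen

lemma good_range (a : List (List Int)) (h : InvT (core a)) :
    ∀ i ∈ PySem.List.pyRange 0 ((a.length : Int) - 1) 2,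
      GoodPair (PySem.List.pyGetD a i []) (PySem.List.pyGetD a (i + 1) []) := by
  intro i hi
  rw [PySem.List.mem_pyRange_iff_of_pos (by norm_num)] at hi
  obtain ⟨h0, hlt, hdvd⟩ := hi
  have hi1 : i = ((i.toNat : Nat) : Int) := by omega
  have hi2 : ((i.toNat : Nat) : Int) + 1 = ((i.toNat + 1 : Nat) : Int) := by push_cast; ring
  have hb1 : i.toNat < 2 * (a.length / 2) := by omega
  have hb2 : i.toNat + 1 < 2 * (a.length / 2) := by omega
  rw [hi1, hi2, PySem.List.pyGetD_natCast, PySem.List.pyGetD_natCast]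
  exact good_of_mem _ h _ _ (getD_mem_core a _ hb1) (getD_mem_core a _ hb2)

lemma foldB (a : List (List Int)) :
    ∀ L : List Int, (∀ i ∈ L, GoodPair (PySem.List.pyGetD a i []) (PySem.List.pyGetD a (i + 1) [])) →
    ∀ acc : List (List Int),
      L.foldl (stepB a) (some acc)
        = some (acc ++ L.flatMap
            (fun i => [winner (PySem.List.pyGetD a i []) (PySem.List.pyGetD a (i + 1) [])])) := by
  intro L
  induction L with
  | nil => intro _ acc; simp
  | cons i L ih =>
    intro h acc
    rw [List.foldl_cons, stepB_good a acc i (h i (by simp)),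
        ih (fun j hj => h j (by simp [hj]))]
    simp

lemma roundB_eq (a : List (List Int)) (h : InvT (core a)) :
    (PySem.List.pyRange 0 ((a.length : Int) - 1) 2).foldl (stepB a) (some [])
      = some (pairsW a) := by
  rw [foldB a _ (good_range a h) [], List.nil_append,
      round_getD (fun x y => [winner x y]) a, pairsFg_winner a]

lemma length_pairsW (a : List (List Int)) : (pairsW a).length = a.length / 2 := by
  induction a using pairsW.induct with
  | case1 x y r ih => simp [pairsW, ih]; omega
  | case2 t h =>
    rcases t with _ | ⟨z, _ | ⟨w, r⟩⟩
    · simp [pairsW]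
    · simp [pairsW]
    · exact absurd rfl (fun hh => h z w r hh)

lemma winner_mem (x y : List Int) : winner x y = x ∨ winner x y = y := by
  unfold winner; split_ifs <;> simp

lemma mem_pairsW_core (a : List (List Int)) :
    ∀ z ∈ pairsW a, z ∈ core a := by
  induction a using pairsW.induct with
  | case1 x y r ih =>
    intro z hz
    rw [pairsW] at hz
    rw [core_cons_cons]
    rcases List.mem_cons.mp hz with hz | hz
    · subst hz
      rcases winner_mem x y with hw | hw
      · rw [hw]; simp
      · rw [hw]; simp
    · exact List.mem_cons_of_mem _ (List.mem_cons_of_mem _ (ih z hz))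
  | case2 t ht =>
    rcases t with _ | ⟨z, _ | ⟨w, r⟩⟩
    · intro z hz; simp [pairsW] at hz
    · intro z hz; simp [pairsW] at hz
    · exact absurd rfl (fun hh => ht z w r hh)

lemma Inv_pairsW (a : List (List Int)) (h : InvT (core a)) : InvT (core (pairsW a)) := by
  refine InvT_subset _ _ (fun z hz => ?_) h
  exact mem_pairsW_core a z (List.take_subset _ _ hz)

lemma go_eq : ∀ (fuel : Nat) (a : List (List Int)), InvT (core a) → 2 ≤ a.length → a.length ≤ fuel →
    tourAltGo fuel a = some (tourGo fuel a) := by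
  intro fuel
  induction fuel with
  | zero => intro a _ h2 hle; omega
  | succ f ih =>
    intro a hInv h2 hle
    have hround : (if PySem.Int.mod (a.length : Int) 2 = 0 then
        (PySem.List.pyRange 0 (a.length : Int) 2).foldl (bodyA a) []
      else
        (PySem.List.pyRange 0 ((a.length : Int) - 1) 2).foldl (bodyA a) []) = pairsW a := by
      split_ifs with hpar
      · rw [pyRange_two_even a.length hpar]; exact roundA_eq a hInv
      · exact roundA_eq a hInv
    rw [tourGo, tourAltGo, hround, if_neg (by omega : ¬ a.length = 1), roundB_eq a hInv]
    have hlen := length_pairsW a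
    by_cases hone : (pairsW a).length = 1
    · rw [if_pos hone]
      rcases f with _ | f'
      · omega
      · show tourAltGo (f' + 1) (pairsW a) = some (pairsW a)
        rw [tourAltGo.eq_def]
        simp [hone]
    · rw [if_neg hone]
      exact ih (pairsW a) (Inv_pairsW a hInv) (by omega) (by omega)

lemma pre_invT (a : List (List Int)) (hpre : Pre_tour a) : InvT (core a) := by
  obtain ⟨h2, h1 | hsame⟩ := hpre
  · exact Or.inl h1
  · rcases a with _ | ⟨x0, rest⟩
    · simp at h2
    · have hk : ∃ m, 2 * ((x0 :: rest).length / 2) = m + 1 := by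
        refine ⟨2 * ((x0 :: rest).length / 2) - 1, ?_⟩
        simp only [List.length_cons] at h2 ⊢; omega
      obtain ⟨m, hm⟩ := hk
      have hx0 : x0 ∈ (x0 :: rest).take (2 * ((x0 :: rest).length / 2)) := by
        rw [hm, List.take_succ_cons]; simp
      obtain ⟨hne, _⟩ := hsame x0 hx0
      rcases hlast : x0.getLast? with _ | c
      · exact absurd (List.getLast?_eq_none_iff.mp hlast) hne
      · refine Or.inr ⟨c, fun x hx => ?_⟩
        have := (hsame x hx).2
        simpa [List.headI, hlast] using this

-- ===== VERDICT (by name: the statement is the Claim_ definition above) =====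
theorem tour_spec : Claim_equal_tour := by
  intro a _ hpre
  unfold Spec_tour tour tour_alt
  rw [go_eq (a.length + 1) a (pre_invT a hpre) hpre.1 (Nat.le_succ _)]
  rfl
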